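-- pv_equiv track=rewrite | github.com/rearview-1/smite-2-calculator-and-optimizer | scripts/build-aspects-catalog.py | detect_replaces_passive
-- ===== SOURCE A (Python) =====
-- STRING_TABLE_SPELLINGS = {
--     # catalog key → list of filename spellings to try in ST_HW_{spelling}_AbilityDescriptions
--     'DaJi': ['Daji', 'DaJi'],
--     'Baron_Samedi': ['BaronSamedi', 'Baron_Samedi'],
--     'Nu_Wa': ['NuWa', 'Nu_Wa'],
--     'The_Morrigan': ['TheMorrigan', 'The_Morrigan', 'Morrigan'],
--     'Guan_Yu': ['GuanYu', 'Guan_Yu'],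
--     'Hun_Batz': ['HunBatz', 'Hunbatz', 'Hun_Batz'],
--     'Sun_Wukong': ['SunWukong', 'Sun_Wukong'],
--     'Ne_Zha': ['NeZha', 'Ne_Zha'],
--     'Jormungandr': ['Jormungandr', 'Jorm'],
--     'JingWei': ['JingWei', 'Jing_Wei'],
--     'HouYi': ['HouYi', 'Hou_Yi'],
--     'MorganLeFay': ['MorganLeFay', 'Morgan_Le_Fay'],
--     'Ratatoskr': ['Ratatoskr', 'ratatoskr'],
-- }
--
-- def detect_replaces_passive(god_id, strings):
--     """Does this god's talent replace its passive? Look for `.Talent.*PSV.*` or `.Talent.*Passive.*` keys."""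
--     candidates = set(STRING_TABLE_SPELLINGS.get(god_id, [god_id]))
--     candidates.add(god_id)
--     candidates.add(god_id.replace('_', ''))
--     candidates |= {c.lower() for c in list(candidates)}
--     for k in strings:
--         for c in candidates:
--             if k.startswith(f'{c}.Talent.') and ('.PSV' in k or '.Passive' in k):
--                 return True
--     return False
-- ===== SOURCE B (Python) =====
-- STRING_TABLE_SPELLINGS = {
--     'DaJi': ['Daji', 'DaJi'],
--     'Baron_Samedi': ['BaronSamedi', 'Baron_Samedi'],
--     'Nu_Wa': ['NuWa', 'Nu_Wa'],
--     'The_Morrigan': ['TheMorrigan', 'The_Morrigan', 'Morrigan'],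
--     'Guan_Yu': ['GuanYu', 'Guan_Yu'],
--     'Hun_Batz': ['HunBatz', 'Hunbatz', 'Hun_Batz'],
--     'Sun_Wukong': ['SunWukong', 'Sun_Wukong'],
--     'Ne_Zha': ['NeZha', 'Ne_Zha'],
--     'Jormungandr': ['Jormungandr', 'Jorm'],
--     'JingWei': ['JingWei', 'Jing_Wei'],
--     'HouYi': ['HouYi', 'Hou_Yi'],
--     'MorganLeFay': ['MorganLeFay', 'Morgan_Le_Fay'],
--     'Ratatoskr': ['Ratatoskr', 'ratatoskr'],
-- }
--
-- def detect_replaces_passive(god_id, strings):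
--     """Does this god's talent replace its passive?  Scan each key for a
--     '.Talent.' occurrence and test the prefix before it by set membership,
--     instead of trying every candidate spelling with startswith."""
--     spell = STRING_TABLE_SPELLINGS.get(god_id, [god_id])
--     base = set(spell) | {god_id, god_id.replace('_', '')}
--     cands = base | {c.lower() for c in base}
--     for k in strings:
--         if '.PSV' in k or '.Passive' in k:
--             for j in range(len(k)):
--                 if k.startswith('.Talent.', j) and k[:j] in cands:
--                     return True
--     return False
-- ===== Notes on version B (the rewrite author's own statement) =====
-- stated objective: faster
-- what changed: B drops the inner loop over candidate spellings: for each key carrying a '.PSV'/'.Passive' marker it scans the key's '.Talent.' occurrence positions and tests the prefix before the occurrence with one set-membership lookup, instead of building f'{c}.Talent.' and re-running startswith for every candidate spelling.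
import Mathlib
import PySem

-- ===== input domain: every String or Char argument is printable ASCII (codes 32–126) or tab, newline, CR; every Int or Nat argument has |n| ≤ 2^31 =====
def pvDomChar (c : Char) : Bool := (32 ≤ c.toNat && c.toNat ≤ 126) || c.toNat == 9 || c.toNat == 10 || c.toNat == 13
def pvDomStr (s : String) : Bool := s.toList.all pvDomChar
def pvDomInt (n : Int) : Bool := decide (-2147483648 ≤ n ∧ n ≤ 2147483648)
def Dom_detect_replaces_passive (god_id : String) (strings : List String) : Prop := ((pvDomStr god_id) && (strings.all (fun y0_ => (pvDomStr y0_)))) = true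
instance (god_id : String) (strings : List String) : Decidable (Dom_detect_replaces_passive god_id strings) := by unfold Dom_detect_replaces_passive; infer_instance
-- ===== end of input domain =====

-- B replaces the inner loop over candidate spellings by a scan over the '.Talent.'
-- occurrence positions of each marked key plus one set-membership test (alternative decomposition).

-- module-level constant STRING_TABLE_SPELLINGS (shared by both Pythons)
def spellTable : PySem.Dict String (List String) :=
  PySem.Dict.ofList
  [("DaJi", ["Daji", "DaJi"]),
   ("Baron_Samedi", ["BaronSamedi", "Baron_Samedi"]),
   ("Nu_Wa", ["NuWa", "Nu_Wa"]),
   ("The_Morrigan", ["TheMorrigan", "The_Morrigan", "Morrigan"]),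
   ("Guan_Yu", ["GuanYu", "Guan_Yu"]),
   ("Hun_Batz", ["HunBatz", "Hunbatz", "Hun_Batz"]),
   ("Sun_Wukong", ["SunWukong", "Sun_Wukong"]),
   ("Ne_Zha", ["NeZha", "Ne_Zha"]),
   ("Jormungandr", ["Jormungandr", "Jorm"]),
   ("JingWei", ["JingWei", "Jing_Wei"]),
   ("HouYi", ["HouYi", "Hou_Yi"]),
   ("MorganLeFay", ["MorganLeFay", "Morgan_Le_Fay"]),
   ("Ratatoskr", ["Ratatoskr", "ratatoskr"])]

-- ===== PORT A =====
-- the first four lines of A's body (building `candidates`)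
def aCandidates (god_id : String) : PySem.Set String :=
  let candidates : PySem.Set String := PySem.Set.ofList (PySem.Dict.getD spellTable god_id [god_id])
  let candidates := PySem.Set.add candidates god_id
  let candidates := PySem.Set.add candidates (PySem.Str.replace god_id "_" "")
  PySem.Set.union candidates (PySem.Set.ofList (candidates.map PySem.Str.lower))

-- f'{c}.Talent.' is ported as list append on .toList (exact); the for/for/return-True
-- loop is the obvious double List.any (the set's iteration order cannot affect a Bool any).
def detect_replaces_passive (god_id : String) (strings : List String) : Bool :=
  let candidates := aCandidates god_id
  strings.any (fun k =>
    candidates.any (fun c =>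
      PySem.Chars.startswith k.toList (c.toList ++ ".Talent.".toList) &&
      (PySem.Str.isIn ".PSV" k || PySem.Str.isIn ".Passive" k)))

-- ===== PORT B =====
-- the first three lines of B's body (building `cands`)
def bCandidates (god_id : String) : PySem.Set String :=
  let spell := PySem.Dict.getD spellTable god_id [god_id]
  let base : PySem.Set String :=
    PySem.Set.union (PySem.Set.ofList spell) [god_id, PySem.Str.replace god_id "_" ""]
  PySem.Set.union base (base.map PySem.Str.lower)

-- k.startswith('.Talent.', j) for 0 ≤ j < len(k) is exactly Chars.startswith on (toList k).drop j;
-- k[:j] is (toList k).take j (exact for those j).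
def detect_replaces_passive_alt (god_id : String) (strings : List String) : Bool :=
  let cands := bCandidates god_id
  strings.any (fun k =>
    (PySem.Str.isIn ".PSV" k || PySem.Str.isIn ".Passive" k) &&
    (List.range k.toList.length).any (fun j =>
      PySem.Chars.startswith (k.toList.drop j) ".Talent.".toList &&
      PySem.Set.contains cands (String.ofList (k.toList.take j))))

-- ===== PRECONDITION & SPEC =====
def Spec_detect_replaces_passive (god_id : String) (strings : List String) (out : Bool) : Prop := out = detect_replaces_passive_alt god_id strings
instance (god_id : String) (strings : List String) (out : Bool) : Decidable (Spec_detect_replaces_passive god_id strings out) := by unfold Spec_detect_replaces_passive; infer_instance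

-- ===== CLAIM (what is proved, stated in full; the proofs are below) =====
def Claim_equal_detect_replaces_passive : Prop := ∀ (god_id : String) (strings : List String), Dom_detect_replaces_passive god_id strings → Spec_detect_replaces_passive god_id strings (detect_replaces_passive god_id strings)

-- ===== LEMMAS AND PROOFS =====

-- the two candidate sets have the same members
lemma cands_mem (god_id x : String) : x ∈ aCandidates god_id ↔ x ∈ bCandidates god_id := by
  unfold aCandidates bCandidates
  generalize PySem.Dict.getD spellTable god_id [god_id] = spell
  generalize PySem.Str.replace god_id "_" "" = rep
  simp only [PySem.Set.mem_union, PySem.Set.mem_add, PySem.Set.mem_ofList, List.mem_map,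
    List.mem_cons]
  constructor
  · rintro ((((h | h) | h) | ⟨c, ((h | h) | h), rfl⟩)) <;>
      first
        | exact Or.inl (Or.inl h)
        | exact Or.inl (Or.inr (Or.inl h))
        | exact Or.inl (Or.inr (Or.inr (Or.inl h)))
        | exact Or.inr ⟨c, Or.inl h, rfl⟩
        | exact Or.inr ⟨c, Or.inr (Or.inl h), rfl⟩
        | exact Or.inr ⟨c, Or.inr (Or.inr (Or.inl h)), rfl⟩
  · rintro ((h | h | h | h) | ⟨c, (h | h | h | h), rfl⟩) <;>
      first
        | exact absurd h (List.not_mem_nil)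
        | exact Or.inl (Or.inl (Or.inl h))
        | exact Or.inl (Or.inl (Or.inr h))
        | exact Or.inl (Or.inr h)
        | exact Or.inr ⟨c, Or.inl (Or.inl h), rfl⟩
        | exact Or.inr ⟨c, Or.inl (Or.inr h), rfl⟩
        | exact Or.inr ⟨c, Or.inr h, rfl⟩

-- occurrence-position scan ⟺ anchored-candidate test (the heart of the equivalence)
lemma scan_iff (cs : List Char) (S : List String) :
    (∃ j < cs.length, ".Talent.".toList <+: cs.drop j ∧ String.ofList (cs.take j) ∈ S) ↔
    (∃ c ∈ S, (c.toList ++ ".Talent.".toList) <+: cs) := by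
  constructor
  · rintro ⟨j, hj, hpre, hmem⟩
    refine ⟨String.ofList (cs.take j), hmem, ?_⟩
    have hL : (String.ofList (cs.take j)).toList = cs.take j := by simp
    rw [hL]
    obtain ⟨u, hu⟩ := hpre
    exact ⟨u, by rw [List.append_assoc, hu, cs.take_append_drop]⟩
  · rintro ⟨c, hmem, hpre⟩
    obtain ⟨t, ht⟩ := hpre
    refine ⟨c.toList.length, ?_, ?_, ?_⟩
    · have hlen : (c.toList ++ ".Talent.".toList ++ t).length = cs.length := by rw [ht]
      simp only [List.length_append] at hlen
      have h8 : (".Talent.".toList).length = 8 := by decide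
      omega
    · have : cs.drop c.toList.length = ".Talent.".toList ++ t := by rw [← ht]; simp
      rw [this]; exact List.prefix_append _ _
    · have htake : cs.take c.toList.length = c.toList := by rw [← ht]; simp
      rw [htake]
      simpa using hmem

-- ===== VERDICT (by name: the statement is the Claim_ definition above) =====
theorem detect_replaces_passive_spec : Claim_equal_detect_replaces_passive := by
  intro god_id strings _
  unfold Spec_detect_replaces_passive detect_replaces_passive detect_replaces_passive_alt
  rw [Bool.eq_iff_iff]
  simp only [List.any_eq_true, Bool.and_eq_true, Bool.or_eq_true,
    PySem.Chars.startswith_iff, PySem.Set.contains_iff, List.mem_range]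
  constructor <;> rintro ⟨k, hk, h⟩
  · obtain ⟨c, hc, hpre, hmark⟩ := h
    refine ⟨k, hk, hmark, ?_⟩
    obtain ⟨j, hj, hp, hm⟩ := (scan_iff k.toList (bCandidates god_id)).2
      ⟨c, (cands_mem god_id c).1 hc, hpre⟩
    exact ⟨j, hj, hp, hm⟩
  · obtain ⟨hmark, j, hj, hp, hm⟩ := h
    obtain ⟨c, hc, hpre⟩ := (scan_iff k.toList (bCandidates god_id)).1 ⟨j, hj, hp, hm⟩
    exact ⟨k, hk, c, (cands_mem god_id c).2 hc, hpre, hmark⟩
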